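-- pv_equiv track=rewrite | github.com/Shahid-724/learning_dsa | 2_Hidden_Treasure.py | solve
-- ===== SOURCE A (Python) =====
-- def solve (n, nums):
--
--     # Defining a function to calculate sum of digits of a given no.
--     def digit_sum(num):
--         res = 0
--         while num:
--             res += num % 10
--             num //= 10
--         return res
--
--     # Defining a function to calculate natural no sum
--     def nat_sum(num):
--         res = 0
--         while num:
--             res += num
--             num -= 1
--         return res
--
--     # Declaring variables
--     hashmap = dict()
--     res = 0
--
--     # Iterating the array and solving
--     for i in nums:
--         cur_sum = digit_sum(i)
--         if cur_sum in hashmap: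
--             hashmap[cur_sum] += 1
--         else:
--             hashmap[cur_sum] = 1
--
--     # Calculating the actual result
--     for i in hashmap:
--         res += nat_sum(hashmap[i] - 1)
--
--     # Returning the result
--     return res
-- ===== SOURCE B (Python) =====
-- def solve(n, nums):
--     # Single pass: each new member of a digit-sum group adds (current group size) pairs.
--     def digit_sum(num):
--         res = 0
--         while num:
--             res += num % 10
--             num //= 10
--         return res
--
--     counts = {}
--     res = 0
--     for i in nums:
--         s = digit_sum(i)
--         c = counts.get(s, 0)
--         res += c
--         counts[s] = c + 1
--     return res
-- ===== Notes on version B (the rewrite author's own statement) =====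
-- stated objective: simpler
-- what changed: Counts pairs incrementally in one pass (res += current group size before incrementing the counter), dropping the nat_sum helper and the whole second loop over the hashmap.
import Mathlib
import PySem

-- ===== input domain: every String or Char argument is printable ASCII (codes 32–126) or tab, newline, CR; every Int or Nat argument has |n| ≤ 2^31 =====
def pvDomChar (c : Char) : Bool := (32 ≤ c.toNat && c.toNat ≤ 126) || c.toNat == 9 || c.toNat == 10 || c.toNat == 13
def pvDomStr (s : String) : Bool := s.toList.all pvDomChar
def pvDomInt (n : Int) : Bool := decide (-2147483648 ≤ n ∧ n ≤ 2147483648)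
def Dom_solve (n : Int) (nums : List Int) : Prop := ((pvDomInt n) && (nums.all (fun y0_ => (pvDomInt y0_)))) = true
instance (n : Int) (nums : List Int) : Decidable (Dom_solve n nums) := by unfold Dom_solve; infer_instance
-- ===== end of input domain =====

-- B fuses A's two loops into one pass: adding the k-th member of a digit-sum group creates k-1 new pairs,
-- so res accumulates the current group size at each step; nat_sum and the second loop disappear.

-- ===== PORT A =====
-- digit_sum: Python's `while num:` loop, exact for num ≥ 0; for num < 0 the Python loop never
-- terminates (no return value exists there), and the guard returns 0.
def digitSum (num : Int) : Int :=
  if num ≤ 0 then 0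
  else PySem.Int.mod num 10 + digitSum (PySem.Int.floordiv num 10)
termination_by num.toNat
decreasing_by
  rw [PySem.Int.floordiv_eq_ediv_of_pos (by norm_num)]
  omega

-- nat_sum: Python's countdown loop; only ever called with num ≥ 0 (count - 1), where it is exact.
def natSum (num : Int) : Int :=
  if num ≤ 0 then 0
  else num + natSum (num - 1)
termination_by num.toNat

def solve (n : Int) (nums : List Int) : Int :=
  let hashmap : PySem.Dict Int Int :=
    nums.foldl (fun h i =>
      let curSum := digitSum i
      if h.contains curSum then h.insert curSum (h.getD curSum 0 + 1)
      else h.insert curSum 1) PySem.Dict.empty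
  hashmap.keys.foldl (fun res i => res + natSum (hashmap.getD i 0 - 1)) 0

-- ===== PORT B =====
def solve_alt (n : Int) (nums : List Int) : Int :=
  (nums.foldl (fun acc i =>
      let s := digitSum i
      let c := acc.2.getD s 0
      (acc.1 + c, acc.2.insert s (c + 1)))
    ((0 : Int), (PySem.Dict.empty : PySem.Dict Int Int))).1

-- ===== PRECONDITION & SPEC =====
def Spec_solve (n : Int) (nums : List Int) (out : Int) : Prop := out = solve_alt n nums
instance (n : Int) (nums : List Int) (out : Int) : Decidable (Spec_solve n nums out) := by unfold Spec_solve; infer_instance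

-- ===== CLAIM (what is proved, stated in full; the proofs are below) =====
def Claim_equal_solve : Prop := ∀ (n : Int) (nums : List Int), Dom_solve n nums → Spec_solve n nums (solve n nums)

-- ===== LEMMAS AND PROOFS =====

-- A's first loop is the standard counting fold (the `else` branch inserts 1 = getD + 1 on a fresh key).
lemma A_fold_eq (nums : List Int) (d : PySem.Dict Int Int) :
    nums.foldl (fun h i =>
      let curSum := digitSum i
      if h.contains curSum then h.insert curSum (h.getD curSum 0 + 1)
      else h.insert curSum 1) d
    = (nums.map digitSum).foldl (fun h s => h.insert s (h.getD s 0 + 1)) d := by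
  induction nums generalizing d with
  | nil => rfl
  | cons x xs ih =>
    simp only [List.foldl, List.map]
    rw [ih]
    congr 1
    by_cases hc : d.contains (digitSum x)
    · simp [hc]
    · rw [PySem.Dict.getD_of_not_contains d (0 : Int) (by simpa using hc), if_neg hc]
      norm_num

-- B's second accumulator component ignores the first.
lemma B_snd (l : List Int) (r : Int) (d : PySem.Dict Int Int) :
    (l.foldl (fun acc i =>
      let s := digitSum i
      let c := acc.2.getD s 0
      (acc.1 + c, acc.2.insert s (c + 1))) (r, d)).2
    = (l.map digitSum).foldl (fun h s => h.insert s (h.getD s 0 + 1)) d := by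
  induction l generalizing r d with
  | nil => rfl
  | cons x xs ih => simp only [List.foldl, List.map]; exact ih _ _

-- natSum c = natSum (c-1) + c for a nonnegative count
lemma natSum_succ (c : Nat) : natSum (c : Int) = natSum ((c : Int) - 1) + c := by
  cases c with
  | zero => simp [natSum]
  | succ m =>
    rw [natSum]
    have : ¬ ((m + 1 : Nat) : Int) ≤ 0 := by push_cast; omega
    simp only [if_neg this]
    ring

-- sum over a nodup list where f and g differ only at one member x
lemma sum_map_update (x : Int) (f g : Int → Int) :
    ∀ (l : List Int), l.Nodup → x ∈ l → (∀ k ∈ l, k ≠ x → f k = g k) →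
    (l.map f).sum = (l.map g).sum + (f x - g x) := by
  intro l
  induction l with
  | nil => simp
  | cons y ys ih =>
    intro hnd hmem hfg
    rcases List.mem_cons.mp hmem with h | h
    · subst h
      have : ys.map f = ys.map g := by
        apply List.map_congr_left
        intro k hk
        exact hfg k (List.mem_cons_of_mem _ hk) (fun hkx => (List.nodup_cons.mp hnd).1 (hkx ▸ hk))
      simp [this]; ring
    · have hyx : y ≠ x := fun hyx => (List.nodup_cons.mp hnd).1 (hyx ▸ h)
      have := ih (List.nodup_cons.mp hnd).2 h (fun k hk => hfg k (List.mem_cons_of_mem _ hk))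
      simp only [List.map, List.sum_cons, this, hfg y (List.mem_cons_self) hyx]
      ring

-- the key step: appending one element to xs adds (count of it so far) to the grouped pair sum
lemma count_append_ne (xs : List Int) (x k : Int) (hk : k ≠ x) :
    (xs ++ [x]).count k = xs.count k := by
  simp [List.count_append, Ne.symm hk]

lemma sum_ofList_append (xs : List Int) (x : Int) :
    ((PySem.Set.ofList (xs ++ [x])).map
      (fun k => natSum ((((xs ++ [x]).count k : Int)) - 1))).sum
    = ((PySem.Set.ofList xs).map (fun k => natSum (((xs.count k : Int)) - 1))).sum
      + (xs.count x : Int) := by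
  have hcx : (xs ++ [x]).count x = xs.count x + 1 := by
    simp [List.count_append]
  rw [PySem.Set.ofList_append_singleton]
  by_cases hx : x ∈ xs
  · rw [PySem.Set.add_of_mem ((PySem.Set.mem_ofList xs x).mpr hx)]
    have hstep : natSum (((xs ++ [x]).count x : Int) - 1)
        = natSum ((xs.count x : Int) - 1) + (xs.count x : Int) := by
      rw [hcx]
      push_cast
      have := natSum_succ (xs.count x)
      push_cast at this
      simpa using this
    have hupd := sum_map_update x
      (fun k => natSum ((((xs ++ [x]).count k : Int)) - 1))
      (fun k => natSum (((xs.count k : Int)) - 1))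
      (PySem.Set.ofList xs) (PySem.Set.nodup_ofList xs) ((PySem.Set.mem_ofList xs x).mpr hx)
      (by
        intro k hk hkx
        simp only []
        rw [count_append_ne xs x k hkx])
    rw [hupd]
    beta_reduce
    rw [hstep]
    ring
  · rw [PySem.Set.add_of_not_mem (fun h => hx ((PySem.Set.mem_ofList xs x).mp h))]
    have hc0 : xs.count x = 0 := List.count_eq_zero.mpr hx
    have hlast : natSum (((xs ++ [x]).count x : Int) - 1) = 0 := by
      rw [hcx, hc0]
      simp [natSum]
    have hsame : ((PySem.Set.ofList xs).map
        (fun k => natSum ((((xs ++ [x]).count k : Int)) - 1))).sum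
        = ((PySem.Set.ofList xs).map (fun k => natSum (((xs.count k : Int)) - 1))).sum := by
      congr 1
      apply List.map_congr_left
      intro k hk
      have hkx : k ≠ x := fun h => hx (h ▸ (PySem.Set.mem_ofList xs k).mp hk)
      rw [count_append_ne xs x k hkx]
    rw [List.map_append, List.sum_append, hsame]
    simp only [List.map_singleton, List.sum_cons, List.sum_nil]
    rw [hlast, hc0]
    simp

-- closed form of B: the grouped pair sum over the digit-sum multiset
lemma B_closed (nums : List Int) :
    (nums.foldl (fun acc i =>
      let s := digitSum i
      let c := acc.2.getD s 0
      (acc.1 + c, acc.2.insert s (c + 1)))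
      ((0 : Int), (PySem.Dict.empty : PySem.Dict Int Int))).1
    = ((PySem.Set.ofList (nums.map digitSum)).map
        (fun k => natSum ((((nums.map digitSum).count k : Int)) - 1))).sum := by
  induction nums using List.reverseRecOn with
  | nil => rfl
  | append_singleton ys x ih =>
    rw [List.foldl_append]
    simp only [List.foldl]
    rw [B_snd]
    have hcounter : (ys.map digitSum).foldl
        (fun h s => h.insert s (h.getD s 0 + 1)) PySem.Dict.empty
        = PySem.Dict.counter (ys.map digitSum) :=
      PySem.Dict.foldl_insert_getD_add_one_eq_counter (ys.map digitSum)
    rw [hcounter, PySem.Dict.getD_counter, ih, List.map_append, List.map_singleton,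
      sum_ofList_append]

-- closed form of A: the same sum
lemma A_closed (n : Int) (nums : List Int) :
    solve n nums
    = ((PySem.Set.ofList (nums.map digitSum)).map
        (fun k => natSum ((((nums.map digitSum).count k : Int)) - 1))).sum := by
  unfold solve
  rw [A_fold_eq, PySem.Dict.foldl_insert_getD_add_one_eq_counter]
  rw [PySem.List.foldl_add
    (g := fun k => natSum ((PySem.Dict.counter (nums.map digitSum)).getD k 0 - 1))]
  rw [PySem.Dict.keys_counter]
  simp only [PySem.Dict.getD_counter, zero_add]

-- ===== VERDICT (by name: the statement is the Claim_ definition above) =====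
theorem solve_spec : Claim_equal_solve := by
  intro n nums _
  unfold Spec_solve solve_alt
  rw [A_closed, B_closed]
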